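-- pv_equiv track=rewrite | github.com/karthikviswanathn/toy-models-of-preference-learning | trainer/utils.py | get_fourier_basis_names
-- ===== SOURCE A (Python) =====
-- def get_fourier_basis_names(p):
--     """Names for Fourier basis vectors: ['Const', 'cos 1', 'sin 1', ...]."""
--     names = ['Const']
--     max_freq = p // 2
--     for i in range(1, max_freq + 1):
--         names.append(f'cos {i}')
--         if i < max_freq or p % 2 == 1:
--             names.append(f'sin {i}')
--     return names
-- ===== SOURCE B (Python) =====
-- def get_fourier_basis_names(p):
--     """Names for Fourier basis vectors: ['Const', 'cos 1', 'sin 1', ...]."""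
--     names = ['Const']
--     for j in range(1, p):
--         freq = (j + 1) // 2
--         trig = 'cos' if j % 2 == 1 else 'sin'
--         names.append(f'{trig} {freq}')
--     return names
-- ===== Notes on version B (the rewrite author's own statement) =====
-- stated objective: alternative
-- what changed: Iterates over output positions j in range(1, p) with frequency (j+1)//2 and parity-chosen trig name (one unconditional append per position), instead of iterating over frequencies 1..p//2 with a guarded second append per frequency.
import Mathlib
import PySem

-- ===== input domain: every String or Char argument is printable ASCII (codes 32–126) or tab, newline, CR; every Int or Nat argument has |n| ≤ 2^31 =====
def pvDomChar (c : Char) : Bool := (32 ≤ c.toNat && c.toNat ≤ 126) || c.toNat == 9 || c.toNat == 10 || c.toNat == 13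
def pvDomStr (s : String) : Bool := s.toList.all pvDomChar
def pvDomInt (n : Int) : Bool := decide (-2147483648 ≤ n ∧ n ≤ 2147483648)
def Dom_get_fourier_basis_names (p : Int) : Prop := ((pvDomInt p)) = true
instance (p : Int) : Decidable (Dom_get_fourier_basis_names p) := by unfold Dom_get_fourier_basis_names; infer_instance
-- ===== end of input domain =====

-- B iterates over output positions (one unconditional append each) instead of frequencies
-- with a guarded second append; an alternative decomposition of the same O(p) task.

-- ===== PORT A =====
def get_fourier_basis_names (p : Int) : List String :=
  let names : List String := ["Const"]
  let max_freq : Int := PySem.Int.floordiv p 2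
  (PySem.List.pyRange 1 (max_freq + 1) 1).foldl
    (fun names i =>
      let names := names ++ ["cos " ++ PySem.Int.toStr i]
      if i < max_freq ∨ PySem.Int.mod p 2 = 1 then names ++ ["sin " ++ PySem.Int.toStr i]
      else names)
    names

-- ===== PORT B =====
def get_fourier_basis_names_alt (p : Int) : List String :=
  (PySem.List.pyRange 1 p 1).foldl
    (fun names j =>
      let freq := PySem.Int.floordiv (j + 1) 2
      let trig := if PySem.Int.mod j 2 = 1 then "cos" else "sin"
      names ++ [trig ++ " " ++ PySem.Int.toStr freq])
    ["Const"]

-- ===== PRECONDITION & SPEC =====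
def Spec_get_fourier_basis_names (p : Int) (out : List String) : Prop := out = get_fourier_basis_names_alt p
instance (p : Int) (out : List String) : Decidable (Spec_get_fourier_basis_names p out) := by unfold Spec_get_fourier_basis_names; infer_instance

-- ===== CLAIM (what is proved, stated in full; the proofs are below) =====
def Claim_equal_get_fourier_basis_names : Prop := ∀ (p : Int), Dom_get_fourier_basis_names p → Spec_get_fourier_basis_names p (get_fourier_basis_names p)

-- ===== LEMMAS AND PROOFS =====

/-- Common closed form: `m` full (cos, sin) pairs after 'Const'. -/
def pvPairs : Nat → List String
  | 0 => ["Const"]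
  | m + 1 => pvPairs m ++ ["cos " ++ PySem.Int.toStr ((m : Int) + 1), "sin " ++ PySem.Int.toStr ((m : Int) + 1)]

/-- A's loop body, parametrised by the sin-condition. -/
def pvBodyA (cond : Int → Bool) (names : List String) (i : Int) : List String :=
  let names := names ++ ["cos " ++ PySem.Int.toStr i]
  if cond i then names ++ ["sin " ++ PySem.Int.toStr i] else names

lemma pvFoldA_true (n : Nat) (cond : Int → Bool)
    (h : ∀ i : Int, 1 ≤ i → i ≤ (n : Int) → cond i = true) :
    (PySem.List.pyRange 1 ((n : Int) + 1) 1).foldl (pvBodyA cond) ["Const"] = pvPairs n := by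
  induction n with
  | zero => simp [pvPairs]
  | succ n ih =>
      have hsplit : PySem.List.pyRange 1 ((n : Int) + 1 + 1) 1
          = PySem.List.pyRange 1 ((n : Int) + 1) 1 ++ [(n : Int) + 1] :=
        PySem.List.pyRange_one_succ_right (by omega)
      rw [show ((n + 1 : Nat) : Int) + 1 = (n : Int) + 1 + 1 by push_cast; ring, hsplit,
        List.foldl_append]
      rw [ih (fun i h1 h2 => h i h1 (by omega))]
      have hc : cond ((n : Int) + 1) = true := h _ (by omega) (by omega)
      simp [pvBodyA, hc, pvPairs]

/-- B's loop body. -/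
def pvBodyB (names : List String) (j : Int) : List String :=
  let freq := PySem.Int.floordiv (j + 1) 2
  let trig := if PySem.Int.mod j 2 = 1 then "cos" else "sin"
  names ++ [trig ++ " " ++ PySem.Int.toStr freq]


lemma pvDiv_two (a : Int) : PySem.Int.floordiv a 2 = a / 2 :=
  PySem.Int.floordiv_eq_ediv_of_pos (by norm_num)

lemma pvFoldB (m : Nat) :
    (PySem.List.pyRange 1 (2 * (m : Int) + 1) 1).foldl pvBodyB ["Const"] = pvPairs m := by
  induction m with
  | zero => simp [pvPairs]
  | succ m ih =>
      have h1 : PySem.List.pyRange 1 (2 * ((m : Int) + 1) + 1) 1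
          = PySem.List.pyRange 1 (2 * (m : Int) + 2) 1 ++ [2 * (m : Int) + 2] := by
        have := PySem.List.pyRange_one_succ_right
          (a := 1) (b := 2 * (m : Int) + 2) (by omega)
        rw [show 2 * ((m : Int) + 1) + 1 = 2 * (m : Int) + 2 + 1 by ring, this]
      have h2 : PySem.List.pyRange 1 (2 * (m : Int) + 2) 1
          = PySem.List.pyRange 1 (2 * (m : Int) + 1) 1 ++ [2 * (m : Int) + 1] := by
        have := PySem.List.pyRange_one_succ_right
          (a := 1) (b := 2 * (m : Int) + 1) (by omega)
        rw [show 2 * (m : Int) + 2 = 2 * (m : Int) + 1 + 1 by ring, this]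
      rw [show ((m + 1 : Nat) : Int) = (m : Int) + 1 by push_cast; ring, h1, h2]
      rw [List.foldl_append, List.foldl_append, ih]
      have hfc' : (2 * (m : Int) + 1 + 1) / 2 = (m : Int) + 1 := by omega
      have hfs' : (2 * (m : Int) + 2 + 1) / 2 = (m : Int) + 1 := by omega
      simp [pvBodyB, hfc', hfs', pvPairs]

lemma pvA_eq (p : Int) :
    get_fourier_basis_names p
      = (PySem.List.pyRange 1 (PySem.Int.floordiv p 2 + 1) 1).foldl
          (pvBodyA (fun i => decide (i < PySem.Int.floordiv p 2 ∨ PySem.Int.mod p 2 = 1)))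
          ["Const"] := by
  unfold get_fourier_basis_names pvBodyA
  simp

lemma pvB_eq (p : Int) :
    get_fourier_basis_names_alt p
      = (PySem.List.pyRange 1 p 1).foldl pvBodyB ["Const"] := rfl

theorem get_fourier_basis_names_spec_aux (p : Int) :
    get_fourier_basis_names p = get_fourier_basis_names_alt p := by
  rw [pvA_eq, pvB_eq]
  by_cases hp : p ≤ 0
  · -- both ranges are empty
    have hA : PySem.Int.floordiv p 2 + 1 ≤ 1 := by rw [pvDiv_two]; omega
    rw [PySem.List.pyRange_one_eq_nil hA, PySem.List.pyRange_one_eq_nil (by omega : p ≤ 1)]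
    rfl
  · replace hp : 0 < p := by omega
    rcases Int.even_or_odd p with ⟨k, hk⟩ | ⟨k, hk⟩
    · -- p = 2k, k ≥ 1: A ends with an unpaired cos, B's last position is odd
      have hk1 : 1 ≤ k := by omega
      obtain ⟨m, hm⟩ : ∃ m : Nat, k = (m : Int) + 1 := ⟨(k - 1).toNat, by omega⟩
      have hmf : PySem.Int.floordiv p 2 = (m : Int) + 1 := by rw [pvDiv_two]; omega
      have hsplit : PySem.List.pyRange 1 ((m : Int) + 1 + 1) 1
          = PySem.List.pyRange 1 ((m : Int) + 1) 1 ++ [(m : Int) + 1] :=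
        PySem.List.pyRange_one_succ_right (by omega)
      rw [hmf, hsplit, List.foldl_append,
        pvFoldA_true m _ (fun i h1 h2 => by simp; omega)]
      have hsplitB : PySem.List.pyRange 1 p 1
          = PySem.List.pyRange 1 (2 * (m : Int) + 1) 1 ++ [2 * (m : Int) + 1] := by
        rw [show p = 2 * (m : Int) + 1 + 1 by omega]
        exact PySem.List.pyRange_one_succ_right (by omega)
      rw [hsplitB, List.foldl_append, pvFoldB m]
      have hp2 : ¬ (p % 2 = 1) := by omega
      have hdiv : (2 * (m : Int) + 1 + 1) / 2 = (m : Int) + 1 := by omega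
      simp [pvBodyA, pvBodyB, hp2, hdiv]
    · -- p = 2k + 1, k ≥ 0: every frequency gets its sin
      obtain ⟨m, hm⟩ : ∃ m : Nat, k = (m : Int) := ⟨k.toNat, by omega⟩
      have hmf : PySem.Int.floordiv p 2 = (m : Int) := by rw [pvDiv_two]; omega
      rw [hmf, pvFoldA_true m _ (fun i h1 h2 => by simp; omega),
        show p = 2 * (m : Int) + 1 by omega, pvFoldB m]

-- ===== VERDICT (by name: the statement is the Claim_ definition above) =====
theorem get_fourier_basis_names_spec : Claim_equal_get_fourier_basis_names := by
  intro p _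
  exact get_fourier_basis_names_spec_aux p
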